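-- pv_equiv track=rewrite | github.com/priya-gurjar/2048 | gameLogic.py | has_left_leading_zeros
-- ===== SOURCE A (Python) =====
-- def has_left_leading_zeros(row):
--     zero_index = -1
--     non_zero_index = -1
--     for i in range(4):
--         if row[i] == 0:
--             zero_index = i
--             break
--
--     for i in range(zero_index + 1, 4):
--         if row[i] != 0:
--             non_zero_index = i
--             break
--
--     return non_zero_index > zero_index
-- ===== SOURCE B (Python) =====
-- def has_left_leading_zeros(row):
--     seen_zero = False
--     for i in range(4):
--         if row[i] == 0:
--             seen_zero = True
--         elif seen_zero:
--             return True
--     return not seen_zero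
-- ===== Notes on version B (the rewrite author's own statement) =====
-- stated objective: simpler
-- what changed: Replaces A's two sequential index scans (find first zero, then find first nonzero after it) by one pass over range(4) maintaining a seen_zero flag with an early return, keeping the exact access order and the True result on no-zero rows.
import Mathlib
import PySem

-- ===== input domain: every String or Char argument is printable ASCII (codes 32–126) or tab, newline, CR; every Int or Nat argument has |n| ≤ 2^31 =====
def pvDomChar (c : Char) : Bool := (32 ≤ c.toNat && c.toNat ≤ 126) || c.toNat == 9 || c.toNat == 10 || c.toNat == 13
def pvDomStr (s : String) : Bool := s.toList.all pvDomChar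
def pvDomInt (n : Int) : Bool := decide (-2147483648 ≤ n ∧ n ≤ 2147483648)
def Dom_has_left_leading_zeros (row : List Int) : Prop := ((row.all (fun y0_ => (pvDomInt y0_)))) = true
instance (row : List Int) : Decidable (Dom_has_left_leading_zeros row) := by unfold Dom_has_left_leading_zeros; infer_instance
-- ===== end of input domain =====

-- B collapses A's two sequential index scans into one stateful pass with a seen_zero flag (objective: simpler).


-- ===== PORT A =====
-- first loop of A: for i in range(4): if row[i] == 0: zero_index = i; break
-- (pyGet? = none is Python's IndexError; Pre_ excludes every input that reaches it, the fold just skips there)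
def pvZeroIndex (row : List Int) : Int :=
  ((PySem.List.pyRange 0 4 1).foldl (fun acc i =>
      match acc with
      | some z => some z
      | none =>
        match PySem.List.pyGet? row i with
        | none => none
        | some v => if v = 0 then some i else none) none).getD (-1)

-- second loop of A: for i in range(zero_index + 1, 4): if row[i] != 0: non_zero_index = i; break
def pvNonZeroIndex (row : List Int) (zero_index : Int) : Int :=
  ((PySem.List.pyRange (zero_index + 1) 4 1).foldl (fun acc i =>
      match acc with
      | some z => some z
      | none =>
        match PySem.List.pyGet? row i with
        | none => none
        | some v => if v ≠ 0 then some i else none) none).getD (-1)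

def has_left_leading_zeros (row : List Int) : Bool :=
  let zero_index := pvZeroIndex row
  let non_zero_index := pvNonZeroIndex row zero_index
  decide (non_zero_index > zero_index)

-- ===== PORT B =====
-- Source B: one pass over range(4) with a seen_zero flag and an early return
-- (the `none` branch is the IndexError case, excluded by Pre_)
def pvScanB (row : List Int) : List Int → Bool → Bool
  | [], seen => !seen
  | i :: rest, seen =>
    match PySem.List.pyGet? row i with
    | none => false
    | some v =>
      if v = 0 then pvScanB row rest true
      else if seen then true else pvScanB row rest seen

def has_left_leading_zeros_alt (row : List Int) : Bool :=
  pvScanB row (PySem.List.pyRange 0 4 1) false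

-- ===== PRECONDITION & SPEC =====
-- Pre_ = exactly the inputs on which Python's A returns (no IndexError): either the row has at
-- least 4 cells, or some zero cell is followed later by a nonzero cell (then both of A's loops
-- break before any out-of-range access).
def Pre_has_left_leading_zeros (row : List Int) : Prop :=
  4 ≤ row.length ∨
    ∃ i < row.length, ∃ j < row.length, i < j ∧ row.getD i 1 = 0 ∧ row.getD j 0 ≠ 0
instance (row : List Int) : Decidable (Pre_has_left_leading_zeros row) := by
  unfold Pre_has_left_leading_zeros; infer_instance
def pvWitness_has_left_leading_zeros : List Int := [1, 0, 2, 0]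

def Spec_has_left_leading_zeros (row : List Int) (out : Bool) : Prop := out = has_left_leading_zeros_alt row
instance (row : List Int) (out : Bool) : Decidable (Spec_has_left_leading_zeros row out) := by unfold Spec_has_left_leading_zeros; infer_instance

-- ===== CLAIM (what is proved, stated in full; the proofs are below) =====
def Claim_equal_has_left_leading_zeros : Prop := ∀ (row : List Int), Dom_has_left_leading_zeros row → Pre_has_left_leading_zeros row → Spec_has_left_leading_zeros row (has_left_leading_zeros row)

-- ===== LEMMAS AND PROOFS =====

-- rows with at least 4 cells: both sides reduce to the same nested ifs on row[0..3] = 0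
theorem pv_main4 (a b c d : Int) (t : List Int) :
    has_left_leading_zeros (a::b::c::d::t) = has_left_leading_zeros_alt (a::b::c::d::t) := by
  have g0 : PySem.List.pyGet? (a::b::c::d::t) 0 = some a := by
    simpa using PySem.List.pyGet?_ofNat (xs := a::b::c::d::t) (n := 0) (by simp)
  have g1 : PySem.List.pyGet? (a::b::c::d::t) 1 = some b := by
    simpa using PySem.List.pyGet?_ofNat (xs := a::b::c::d::t) (n := 1) (by simp)
  have g2 : PySem.List.pyGet? (a::b::c::d::t) 2 = some c := by
    simpa using PySem.List.pyGet?_ofNat (xs := a::b::c::d::t) (n := 2) (by simp)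
  have g3 : PySem.List.pyGet? (a::b::c::d::t) 3 = some d := by
    simpa using PySem.List.pyGet?_ofNat (xs := a::b::c::d::t) (n := 3) (by simp)
  have r0 : PySem.List.pyRange 0 4 1 = [0,1,2,3] := by decide
  have rm1 : PySem.List.pyRange (-1 + 1) 4 1 = [0,1,2,3] := by decide
  have r1 : PySem.List.pyRange (0 + 1) 4 1 = [1,2,3] := by decide
  have r2 : PySem.List.pyRange (1 + 1) 4 1 = [2,3] := by decide
  have r3 : PySem.List.pyRange (2 + 1) 4 1 = [3] := by decide
  have r4 : PySem.List.pyRange (3 + 1) 4 1 = [] := by decide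
  have hz : pvZeroIndex (a::b::c::d::t) =
      (if a = 0 then 0 else if b = 0 then 1 else if c = 0 then 2 else if d = 0 then 3 else -1) := by
    simp only [pvZeroIndex, r0, List.foldl_cons, List.foldl_nil, g0, g1, g2, g3]
    split_ifs <;> rfl
  have hm1 : pvNonZeroIndex (a::b::c::d::t) (-1) =
      (if a ≠ 0 then 0 else if b ≠ 0 then 1 else if c ≠ 0 then 2 else if d ≠ 0 then 3 else -1) := by
    simp only [pvNonZeroIndex, rm1, List.foldl_cons, List.foldl_nil, g0, g1, g2, g3]
    split_ifs <;> rfl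
  have h0 : pvNonZeroIndex (a::b::c::d::t) 0 =
      (if b ≠ 0 then 1 else if c ≠ 0 then 2 else if d ≠ 0 then 3 else -1) := by
    simp only [pvNonZeroIndex, r1, List.foldl_cons, List.foldl_nil, g1, g2, g3]
    split_ifs <;> rfl
  have h1 : pvNonZeroIndex (a::b::c::d::t) 1 =
      (if c ≠ 0 then 2 else if d ≠ 0 then 3 else -1) := by
    simp only [pvNonZeroIndex, r2, List.foldl_cons, List.foldl_nil, g2, g3]
    split_ifs <;> rfl
  have h2 : pvNonZeroIndex (a::b::c::d::t) 2 =
      (if d ≠ 0 then 3 else -1) := by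
    simp only [pvNonZeroIndex, r3, List.foldl_cons, List.foldl_nil, g3]
    split_ifs <;> rfl
  have h3 : pvNonZeroIndex (a::b::c::d::t) 3 = -1 := by
    simp only [pvNonZeroIndex, r4, List.foldl_nil]
    rfl
  simp only [has_left_leading_zeros, has_left_leading_zeros_alt, r0, pvScanB, g0, g1, g2, g3, hz]
  split_ifs with ha hb hc hd <;> simp_all

-- length 2, a zero followed by a nonzero: both return true
theorem pv_short2 (a b : Int) (ha : a = 0) (hb : b ≠ 0) :
    has_left_leading_zeros [a, b] = has_left_leading_zeros_alt [a, b] := by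
  subst ha
  have g0 : PySem.List.pyGet? [(0:Int), b] 0 = some 0 := by
    simpa using PySem.List.pyGet?_ofNat (xs := [(0:Int), b]) (n := 0) (by simp)
  have g1 : PySem.List.pyGet? [(0:Int), b] 1 = some b := by
    simpa using PySem.List.pyGet?_ofNat (xs := [(0:Int), b]) (n := 1) (by simp)
  have r0 : PySem.List.pyRange 0 4 1 = [0,1,2,3] := by decide
  have hz : pvZeroIndex [(0:Int), b] = 0 := by
    simp only [pvZeroIndex, r0, List.foldl_cons, List.foldl_nil, g0]
    rfl
  have h0 : pvNonZeroIndex [(0:Int), b] 0 = 1 := by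
    have r1 : PySem.List.pyRange (0 + 1) 4 1 = [1,2,3] := by decide
    simp only [pvNonZeroIndex, r1, List.foldl_cons, List.foldl_nil, g1]
    simp [hb]
  simp only [has_left_leading_zeros, has_left_leading_zeros_alt, pvScanB, r0, g0, g1, hz, h0]
  simp [hb]

-- length 3, some zero followed by a nonzero: reduce to nested ifs and case on the pair
theorem pv_short3 (a b c : Int)
    (h : ∃ i < 3, ∃ j < 3, i < j ∧ [a,b,c].getD i 1 = 0 ∧ [a,b,c].getD j 0 ≠ 0) :
    has_left_leading_zeros [a, b, c] = has_left_leading_zeros_alt [a, b, c] := by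
  have hdisj : (a = 0 ∧ b ≠ 0) ∨ (a = 0 ∧ c ≠ 0) ∨ (b = 0 ∧ c ≠ 0) := by
    obtain ⟨i, hi, j, hj, hij, hzero, hnz⟩ := h
    interval_cases j <;> interval_cases i <;> simp_all
  have g0 : PySem.List.pyGet? [a,b,c] 0 = some a := by
    simpa using PySem.List.pyGet?_ofNat (xs := [a,b,c]) (n := 0) (by simp)
  have g1 : PySem.List.pyGet? [a,b,c] 1 = some b := by
    simpa using PySem.List.pyGet?_ofNat (xs := [a,b,c]) (n := 1) (by simp)
  have g2 : PySem.List.pyGet? [a,b,c] 2 = some c := by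
    simpa using PySem.List.pyGet?_ofNat (xs := [a,b,c]) (n := 2) (by simp)
  have g3 : PySem.List.pyGet? [a,b,c] 3 = none := by
    simp [PySem.List.pyGet?, PySem.List.pyIdx?]
  have r0 : PySem.List.pyRange 0 4 1 = [0,1,2,3] := by decide
  have r1 : PySem.List.pyRange (0 + 1) 4 1 = [1,2,3] := by decide
  have r2 : PySem.List.pyRange (1 + 1) 4 1 = [2,3] := by decide
  have r3 : PySem.List.pyRange (2 + 1) 4 1 = [3] := by decide
  have hz : pvZeroIndex [a,b,c] =
      (if a = 0 then 0 else if b = 0 then 1 else if c = 0 then 2 else -1) := by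
    simp only [pvZeroIndex, r0, List.foldl_cons, List.foldl_nil, g0, g1, g2, g3]
    split_ifs <;> rfl
  have h0 : pvNonZeroIndex [a,b,c] 0 =
      (if b ≠ 0 then 1 else if c ≠ 0 then 2 else -1) := by
    simp only [pvNonZeroIndex, r1, List.foldl_cons, List.foldl_nil, g1, g2, g3]
    split_ifs <;> rfl
  have h1 : pvNonZeroIndex [a,b,c] 1 =
      (if c ≠ 0 then 2 else -1) := by
    simp only [pvNonZeroIndex, r2, List.foldl_cons, List.foldl_nil, g2, g3]
    split_ifs <;> rfl
  have h2 : pvNonZeroIndex [a,b,c] 2 = -1 := by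
    simp only [pvNonZeroIndex, r3, List.foldl_cons, List.foldl_nil, g3]
    rfl
  simp only [has_left_leading_zeros, has_left_leading_zeros_alt, pvScanB, r0, g0, g1, g2, g3, hz]
  clear g0 g1 g2 g3 r0 r1 r2 r3 hz h
  split_ifs with ha hb hc <;>
    rcases hdisj with ⟨h1', h2'⟩ | ⟨h1', h2'⟩ | ⟨h1', h2'⟩ <;> simp_all

-- ===== VERDICT (by name: the statement is the Claim_ definition above) =====
theorem has_left_leading_zeros_spec : Claim_equal_has_left_leading_zeros := by
  intro row _ hpre
  unfold Spec_has_left_leading_zeros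
  rcases row with _ | ⟨a, _ | ⟨b, _ | ⟨c, _ | ⟨d, t⟩⟩⟩⟩
  · rcases hpre with h | ⟨i, hi, j, hj, hij, _⟩ <;> simp_all
  · rcases hpre with h | ⟨i, hi, j, hj, hij, _⟩ <;> simp_all
  · rcases hpre with h | ⟨i, hi, j, hj, hij, hz, hn⟩
    · simp_all
    · have hi0 : i = 0 := by simp at hi hj; omega
      have hj1 : j = 1 := by simp at hi hj; omega
      subst hi0; subst hj1
      exact pv_short2 a b (by simpa using hz) (by simpa using hn)
  · rcases hpre with h | h
    · simp_all
    · exact pv_short3 a b c (by simpa using h)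
  · exact pv_main4 a b c d t
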